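-- pv_equiv track=rewrite | github.com/HARS7IT/Coding-Practice---Placement-Training | u15l1.py | butterfly
-- ===== SOURCE A (Python) =====
-- def butterfly(n):
--     pattern = []
--
--     # Upper Half
--     for i in range(1, n + 1):
--         line = (
--             "*" * i +
--             " " * (2 * (n - i)) +
--             "*" * i
--         )
--         pattern.append(line)
--
--     # Lower Half
--     for i in range(n, 0, -1):
--         line = (
--             "*" * i +
--             " " * (2 * (n - i)) +
--             "*" * i
--         )
--         pattern.append(line)
--
--     return "\n".join(pattern)
-- ===== SOURCE B (Python) =====
-- def butterfly(n):
--     w = 2 * n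
--     out = []
--     for r in range(w):
--         s = min(r + 1, w - r)
--         row = bytearray(b" " * w)
--         row[:s] = b"*" * s
--         row[w - s:] = b"*" * s
--         out.append(row.decode())
--     return "\n".join(out)
-- ===== Notes on version B (the rewrite author's own statement) =====
-- stated objective: alternative
-- what changed: B renders the pattern as a square character grid in one loop over all rows, computing each row's star width arithmetically from the row index and stamping two star segments into a mutable space buffer, instead of A's two generating loops concatenating string repetitions.
import Mathlib
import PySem

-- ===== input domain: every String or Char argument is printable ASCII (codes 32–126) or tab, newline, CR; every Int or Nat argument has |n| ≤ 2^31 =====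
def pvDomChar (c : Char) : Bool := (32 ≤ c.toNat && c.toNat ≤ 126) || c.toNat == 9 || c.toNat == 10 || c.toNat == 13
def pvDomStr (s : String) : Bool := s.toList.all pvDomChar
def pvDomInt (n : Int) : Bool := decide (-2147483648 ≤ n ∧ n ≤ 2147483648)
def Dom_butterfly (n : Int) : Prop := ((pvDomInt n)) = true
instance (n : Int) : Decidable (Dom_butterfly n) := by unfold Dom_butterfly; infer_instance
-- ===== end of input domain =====

-- B draws the butterfly as a 2n×2n character grid: each cell is '*' or ' ' by a position
-- predicate, instead of A's two loops concatenating string repetitions; objective: alternative.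

-- ===== PORT A =====
-- one butterfly line of A: "*"*i + " "*(2*(n-i)) + "*"*i
def butterflyLine (n i : Int) : List Char :=
  PySem.List.pyRepeat ['*'] i ++ PySem.List.pyRepeat [' '] (2 * (n - i)) ++ PySem.List.pyRepeat ['*'] i

def butterfly (n : Int) : String :=
  let pattern : List (List Char) :=
    (PySem.List.pyRange 1 (n + 1) 1).foldl (fun acc i => acc ++ [butterflyLine n i]) []
  let pattern :=
    (PySem.List.pyRange n 0 (-1)).foldl (fun acc i => acc ++ [butterflyLine n i]) pattern
  String.ofList (PySem.Chars.join ['\n'] pattern)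

-- ===== PORT B =====
-- Python slice-assignment row[a:a+len(seg)] = seg, exact for 0 <= a and a+len(seg) <= len(row)
def writeSeg (l : List Char) (a : Int) (seg : List Char) : List Char :=
  l.take a.toNat ++ seg ++ l.drop (a.toNat + seg.length)

-- one row of B: a space buffer of width w with two star segments stamped in place
def butterflyRowB (w r : Int) : List Char :=
  let s := min (r + 1) (w - r)
  let row := List.replicate w.toNat ' '
  let row := writeSeg row 0 (List.replicate s.toNat '*')
  let row := writeSeg row (w - s) (List.replicate s.toNat '*')
  row

def butterfly_alt (n : Int) : String :=
  let w := 2 * n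
  let rows : List (List Char) :=
    (PySem.List.pyRange 0 w 1).foldl (fun acc r => acc ++ [butterflyRowB w r]) []
  String.ofList (PySem.Chars.join ['\n'] rows)

-- ===== PRECONDITION & SPEC =====
def Spec_butterfly (n : Int) (out : String) : Prop := out = butterfly_alt n
instance (n : Int) (out : String) : Decidable (Spec_butterfly n out) := by unfold Spec_butterfly; infer_instance

-- ===== CLAIM (what is proved, stated in full; the proofs are below) =====
def Claim_equal_butterfly : Prop := ∀ (n : Int), Dom_butterfly n → Spec_butterfly n (butterfly n)

-- ===== LEMMAS AND PROOFS =====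

-- B's grid row r equals A's line for i = min(r+1, 2n-r)
lemma rowB_eq_line (n r : Int) (h0 : 0 ≤ r) (h1 : r < 2 * n) :
    butterflyRowB (2 * n) r = butterflyLine n (min (r + 1) (2 * n - r)) := by
  set i := min (r + 1) (2 * n - r) with hi
  have hi1 : 1 ≤ i := by omega
  have hin : i ≤ n := by omega
  unfold butterflyRowB butterflyLine writeSeg
  simp only [PySem.List.pyRepeat_singleton, List.take_append,
    List.drop_append, List.take_replicate, List.drop_replicate,
    List.length_replicate, List.append_assoc]
  rw [← hi]
  obtain ⟨k, m, hik, hnm, h1k, hkm⟩ :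
      ∃ (k m : Nat), i = (k : Int) ∧ n = (m : Int) ∧ 1 ≤ k ∧ k ≤ m :=
    ⟨i.toNat, n.toNat, by omega, by omega, by omega, by omega⟩
  rw [hik, hnm]
  have c1 : (2 * (m : Int) - (k : Int)) = ((2 * m - k : Nat) : Int) := by omega
  have c2 : (2 * ((m : Int) - (k : Int))) = ((2 * (m - k) : Nat) : Int) := by omega
  have c3 : (2 * (m : Int)) = ((2 * m : Nat) : Int) := by omega
  rw [c1, c2, c3]
  simp only [Int.toNat_natCast, Int.toNat_zero, Nat.zero_min, Nat.min_zero, Nat.sub_zero,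
    Nat.zero_add, List.replicate_zero, List.nil_append]
  have a1 : min (2 * m - k) k = k := by omega
  have a2 : min (2 * m - k - k) (2 * m - k) = 2 * (m - k) := by omega
  have a3 : 0 - (2 * m - k + k) = 0 := by omega
  have a4 : k - (2 * m - k + k) = 0 := by omega
  have a5 : 2 * m - k - (2 * m - k + k - k) = 0 := by omega
  rw [a1, a2, a3, a4, a5]
  simp

-- the full grid equals A's upper half followed by its mirror image
lemma grid_eq_pattern (n : Int) :
    (PySem.List.pyRange 0 (2 * n) 1).map (butterflyRowB (2 * n)) =
      (PySem.List.pyRange 1 (n + 1) 1).map (butterflyLine n) ++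
      ((PySem.List.pyRange 1 (n + 1) 1).map (butterflyLine n)).reverse := by
  by_cases hn : n ≤ 0
  · rw [PySem.List.pyRange_one_eq_nil (by omega), PySem.List.pyRange_one_eq_nil (by omega)]
    simp
  · replace hn : 0 < n := by omega
    rw [PySem.List.pyRange_one_append 0 n (2 * n) (by omega) (by omega), List.map_append]
    congr 1
    · -- upper half: rows 0..n-1, star count r+1
      rw [PySem.List.pyRange_one 0 n, PySem.List.pyRange_one 1 (n + 1), List.map_map, List.map_map]
      have hlen : (n - 0).toNat = (n + 1 - 1).toNat := by omega
      rw [hlen]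
      apply List.map_congr_left
      intro k hk
      rw [List.mem_range] at hk
      have hk' : (k : Int) < n := by omega
      simp only [Function.comp_apply, zero_add]
      rw [rowB_eq_line n k (by omega) (by omega)]
      congr 1
      omega
    · -- lower half: rows n..2n-1, star count 2n-r
      have hrev := PySem.List.pyRange_neg_one_eq_reverse n 0
      norm_num at hrev
      rw [← List.map_reverse, ← hrev,
          PySem.List.pyRange_one n (2 * n), PySem.List.pyRange_neg_one n 0,
          List.map_map, List.map_map]
      have hlen : (2 * n - n).toNat = (n - 0).toNat := by omega
      rw [hlen]
      apply List.map_congr_left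
      intro k hk
      rw [List.mem_range] at hk
      have hk' : (k : Int) < n := by omega
      simp only [Function.comp_apply]
      rw [rowB_eq_line n (n + k) (by omega) (by omega)]
      congr 1
      omega

-- ===== VERDICT (by name: the statement is the Claim_ definition above) =====
theorem butterfly_spec : Claim_equal_butterfly := by
  intro n _
  show butterfly n = butterfly_alt n
  simp only [butterfly, butterfly_alt, PySem.List.foldl_append_singleton_eq_map,
    PySem.List.pyRange_neg_one_eq_reverse, List.map_reverse, List.nil_append]
  norm_num
  rw [grid_eq_pattern n]
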